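-- pv_equiv track=rewrite | github.com/Kanimozhi33/dsa-code-practices | binary search/books_allocation.py | books_allocation
-- ===== SOURCE A (Python) =====
-- def books_allocation(nums,m):
--     if m > len(nums):
--         return -1
--     left = max(nums)
--
--     right = sum(nums)
--     while left <= right:
--         mid = (left+right)//2
--         person = 1
--         book = 0
--         for num in nums:
--             if book + num > mid:
--                 person +=1
--                 book = num
--                 if person > m:
--                     break
--             else:
--                 book += num
--
--         if person > m:
--             left = mid+1
--         else:
--             right = mid-1
--     return left
-- ===== SOURCE B (Python) =====
-- def books_allocation(nums, m):
--     if m > len(nums):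
--         return -1
--
--     def students(cap):
--         # number of students the greedy split needs under page cap `cap`
--         # (no early exit: the count is compared with m by the caller)
--         cnt, cur = 1, 0
--         for x in nums:
--             if cur + x > cap:
--                 cnt, cur = cnt + 1, x
--             else:
--                 cur += x
--         return cnt
--
--     def search(lo, hi):
--         if lo > hi:
--             return lo
--         mid = (lo + hi) // 2
--         if students(mid) > m:
--             return search(mid + 1, hi)
--         return search(lo, mid - 1)
--
--     return search(max(nums), sum(nums))
-- ===== Notes on version B (the rewrite author's own statement) =====
-- stated objective: alternative
-- what changed: B replaces A's imperative while-loop with mutable bounds and an inner for-loop with early break by a recursive binary search calling a fold-style segment counter with no early exit; exact equality over arbitrary ints (negatives included) pins down the same feasibility predicate, so the change is in decomposition and control flow, not in asymptotics.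
import Mathlib
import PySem

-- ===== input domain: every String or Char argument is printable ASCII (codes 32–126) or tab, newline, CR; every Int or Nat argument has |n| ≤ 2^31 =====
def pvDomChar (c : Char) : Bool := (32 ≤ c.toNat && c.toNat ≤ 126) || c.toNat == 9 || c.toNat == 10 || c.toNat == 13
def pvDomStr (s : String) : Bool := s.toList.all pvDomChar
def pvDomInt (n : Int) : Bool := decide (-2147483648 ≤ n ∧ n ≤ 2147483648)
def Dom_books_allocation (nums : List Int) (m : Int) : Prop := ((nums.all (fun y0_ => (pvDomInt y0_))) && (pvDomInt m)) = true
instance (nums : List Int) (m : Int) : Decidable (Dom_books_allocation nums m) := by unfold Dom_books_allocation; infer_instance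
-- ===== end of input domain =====

-- B replaces A's while-loop with inner break-loop by a recursive binary search over the same
-- midpoints calling a fold-based student counter (no early exit); objective: alternative decomposition.

-- ===== PORT A =====
-- inner `for num in nums` loop of A, with its early `break` once person > m;
-- returns the final `person` (the `book` accumulator is the second state component)
def booksForA (m mid : Int) : List Int → Int → Int → Int
  | [], person, _book => person
  | num :: rest, person, book =>
    if book + num > mid then
      if person + 1 > m then person + 1
      else booksForA m mid rest (person + 1) num
    else booksForA m mid rest person (book + num)

-- A's `while left <= right` loop
def booksWhileA (nums : List Int) (m : Int) (left right : Int) : Int :=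
  if h : left ≤ right then
    if booksForA m (PySem.Int.floordiv (left + right) 2) nums 1 0 > m then
      booksWhileA nums m (PySem.Int.floordiv (left + right) 2 + 1) right
    else booksWhileA nums m left (PySem.Int.floordiv (left + right) 2 - 1)
  else left
termination_by (right + 1 - left).toNat
decreasing_by
  · have := PySem.Int.floordiv_two_mid_bounds h; omega
  · have := PySem.Int.floordiv_two_mid_bounds h; omega

def books_allocation (nums : List Int) (m : Int) : Int :=
  if m > (nums.length : Int) then -1
  else
    -- max(nums): raises on []; Pre_ excludes that case, the default 0 is unreachable there
    let left := (PySem.List.max? nums (fun x => x)).getD 0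
    let right := nums.foldl (· + ·) 0
    booksWhileA nums m left right

-- ===== PORT B =====
-- Source B's `students(cap)`: fold over nums, counting greedy segments, no early exit
def studentsB (nums : List Int) (cap : Int) : Int :=
  (nums.foldl (fun (s : Int × Int) x =>
      if s.2 + x > cap then (s.1 + 1, x) else (s.1, s.2 + x)) (1, 0)).1

-- Source B's recursive `search(lo, hi)`
def searchB (nums : List Int) (m : Int) (lo hi : Int) : Int :=
  if h : lo > hi then lo
  else
    if studentsB nums (PySem.Int.floordiv (lo + hi) 2) > m then
      searchB nums m (PySem.Int.floordiv (lo + hi) 2 + 1) hi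
    else searchB nums m lo (PySem.Int.floordiv (lo + hi) 2 - 1)
termination_by (hi + 1 - lo).toNat
decreasing_by
  · have := PySem.Int.floordiv_two_mid_bounds (by omega : lo ≤ hi); omega
  · have := PySem.Int.floordiv_two_mid_bounds (by omega : lo ≤ hi); omega

def books_allocation_alt (nums : List Int) (m : Int) : Int :=
  if m > (nums.length : Int) then -1
  else searchB nums m ((PySem.List.max? nums (fun x => x)).getD 0) (nums.foldl (· + ·) 0)

-- ===== PRECONDITION & SPEC =====
-- Pre_ excludes exactly the inputs where both Pythons raise ValueError: max([]) with m ≤ 0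
def Pre_books_allocation (nums : List Int) (m : Int) : Prop := nums ≠ [] ∨ 0 < m
instance (nums : List Int) (m : Int) : Decidable (Pre_books_allocation nums m) := by unfold Pre_books_allocation; infer_instance
def pvWitness_books_allocation : List Int × Int := ([12, 34, 67, 90], 2)

def Spec_books_allocation (nums : List Int) (m : Int) (out : Int) : Prop := out = books_allocation_alt nums m
instance (nums : List Int) (m : Int) (out : Int) : Decidable (Spec_books_allocation nums m out) := by unfold Spec_books_allocation; infer_instance

-- ===== CLAIM (what is proved, stated in full; the proofs are below) =====
def Claim_equal_books_allocation : Prop := ∀ (nums : List Int) (m : Int), Dom_books_allocation nums m → Pre_books_allocation nums m → Spec_books_allocation nums m (books_allocation nums m)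

-- ===== LEMMAS AND PROOFS =====

-- the fold's running count never decreases
theorem studentsB_fold_ge (cap : Int) (nums : List Int) (person book : Int) :
    person ≤ (nums.foldl (fun (s : Int × Int) x =>
      if s.2 + x > cap then (s.1 + 1, x) else (s.1, s.2 + x)) (person, book)).1 := by
  induction nums generalizing person book with
  | nil => simp
  | cons num rest ih =>
    simp only [List.foldl]
    split
    · exact le_trans (by omega) (ih (person + 1) num)
    · exact ih person (book + num)

-- A's break-loop and B's fold agree on the only thing the callers test: count > m
theorem booksForA_iff (m cap : Int) (nums : List Int) (person book : Int) :
    booksForA m cap nums person book > m ↔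
    (nums.foldl (fun (s : Int × Int) x =>
      if s.2 + x > cap then (s.1 + 1, x) else (s.1, s.2 + x)) (person, book)).1 > m := by
  induction nums generalizing person book with
  | nil => simp [booksForA]
  | cons num rest ih =>
    simp only [booksForA, List.foldl]
    split
    · split
      · rename_i hgt
        constructor
        · intro _; exact lt_of_lt_of_le hgt (studentsB_fold_ge cap rest (person + 1) num)
        · intro _; exact hgt
      · exact ih (person + 1) num
    · exact ih person (book + num)

theorem while_eq_search (nums : List Int) (m : Int) :
    ∀ left right, booksWhileA nums m left right = searchB nums m left right := by
  intro left right
  induction left, right using booksWhileA.induct nums m with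
  | case1 left right h hgt ih =>
    rw [booksWhileA, searchB]
    simp only [dif_pos h, dif_neg (by omega : ¬ left > right)]
    rw [if_pos hgt, if_pos (by simpa [studentsB, ← (booksForA_iff m _ nums 1 0)] using hgt)]
    exact ih
  | case2 left right h hle ih =>
    rw [booksWhileA, searchB]
    simp only [dif_pos h, dif_neg (by omega : ¬ left > right)]
    rw [if_neg hle, if_neg (by simpa [studentsB, ← (booksForA_iff m _ nums 1 0)] using hle)]
    exact ih
  | case3 left right h =>
    rw [booksWhileA, searchB]
    simp only [dif_neg h, dif_pos (by omega : left > right)]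

-- ===== VERDICT (by name: the statement is the Claim_ definition above) =====
theorem books_allocation_spec : Claim_equal_books_allocation := by
  intro nums m _ _
  unfold Spec_books_allocation books_allocation books_allocation_alt
  split
  · rfl
  · exact while_eq_search nums m _ _
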